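-- pv_equiv track=rewrite | github.com/olg4n1k/advent-of-code-2025 | day10/part2.py | _build_button_map
-- ===== SOURCE A (Python) =====
-- def _build_button_map(joltage: tuple[int, ...], buttons: tuple[set[int], ...]) -> tuple[list[int], dict[int, tuple[set[int]]]]:
--     n = len(joltage)
--     button_map = dict()
--     for i in range(n):
--         button_map[i] = tuple(b for b in buttons if i in b)
--
--     unordered = set(range(n))
--     order = []
--
--     while unordered:
--         # Heuristic: find smallest counter first by button length, then max by joltage
--         min_len = min(len(button_map[i]) for i in unordered)
--         i = max(filter(lambda i: len(button_map[i]) == min_len, unordered), key=lambda i: joltage[i])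
--         # Variant 1:
--         # i = min(unordered, key=lambda i: len(button_map[i]))
--         # Variant 2: same as current, but with min by joltage
--         order.append(i)
--         unordered.remove(i)
--         for j in unordered:
--             button_map[j] = tuple(b for b in button_map[j] if i not in b)
--
--     return (order, button_map)
-- ===== SOURCE B (Python) =====
-- def _build_button_map(joltage, buttons):
--     # Faster alternative: keep the selection order, but instead of re-filtering every
--     # counter's button tuple each round, keep one shared list of still-alive buttons,
--     # a per-counter alive-button count, and decrement counts when buttons die.
--     n = len(joltage)
--     alive = list(buttons)                                   # buttons no picked counter belongs to
--     cnt = [sum(1 for b in buttons if i in b) for i in range(n)]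
--     pending = [True] * n
--     res = [()] * n
--     order = []
--     for _ in range(n):
--         best = -1
--         for i in range(n):
--             if pending[i] and (best < 0 or cnt[i] < cnt[best]
--                                or (cnt[i] == cnt[best] and joltage[i] > joltage[best])):
--                 best = i
--         i = best
--         pending[i] = False
--         order.append(i)
--         res[i] = tuple(b for b in alive if i in b)          # i's alive buttons, frozen now
--         alive = [b for b in alive if i not in b]
--         for b in res[i]:                                    # these buttons just died:
--             for j in b:                                     # drop them from members' counts
--                 if 0 <= j < n and pending[j]:
--                     cnt[j] -= 1
--     return (order, {i: res[i] for i in range(n)})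
-- ===== Notes on version B (the rewrite author's own statement) =====
-- stated objective: faster
-- what changed: A rebuilds every unordered counter's tuple of surviving buttons each round (re-filtering per counter per round); B keeps one shared list of alive buttons and per-counter alive-button counts, decrementing counts only when a picked counter kills a button, and records each counter's surviving buttons once at pick time.
import Mathlib
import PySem

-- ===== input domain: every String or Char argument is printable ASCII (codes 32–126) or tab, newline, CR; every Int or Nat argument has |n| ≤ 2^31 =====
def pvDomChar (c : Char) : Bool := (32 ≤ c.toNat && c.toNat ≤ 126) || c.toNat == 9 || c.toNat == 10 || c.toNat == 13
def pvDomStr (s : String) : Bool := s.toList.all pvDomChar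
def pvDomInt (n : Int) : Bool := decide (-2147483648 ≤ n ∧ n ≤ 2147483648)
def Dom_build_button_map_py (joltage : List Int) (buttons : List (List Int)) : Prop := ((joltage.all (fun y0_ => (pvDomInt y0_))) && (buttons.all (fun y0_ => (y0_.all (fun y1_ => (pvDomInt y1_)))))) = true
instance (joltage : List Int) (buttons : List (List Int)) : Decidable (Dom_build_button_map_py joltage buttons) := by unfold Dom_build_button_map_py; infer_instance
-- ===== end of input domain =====

-- B replaces A's per-round re-filtering of every counter's button tuple by one shared
-- alive-button list plus per-counter alive counts that are decremented when a picked
-- counter kills a button (objective: faster; same selection rule and same returned map).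
-- Python A's internal set `unordered` = set(range(n)) with removals iterates ascending
-- in CPython; it is ported as the ascending list with removal.


-- while-loop of A; fuel = |unordered| counts the remaining iterations exactly
def aLoop (joltage : List Int) : Nat → List Int → PySem.Dict Int (List (List Int)) → List Int →
    (List Int × PySem.Dict Int (List (List Int)))
  | 0, _, bm, order => (order, bm)
  | fuel+1, unordered, bm, order =>
    if unordered.isEmpty then (order, bm) else
      -- min_len = min(len(button_map[i]) for i in unordered)
      let minLen : Int :=
        ((PySem.List.min? (unordered.map (fun i => PySem.List.len (bm.getD i []))) (fun v => v)).getD 0)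
      -- i = max(filter(lambda i: len(button_map[i]) == min_len, unordered), key=lambda i: joltage[i])
      -- (the filtered list is nonempty, so the default 0 of maxD is never used)
      let i : Int :=
        PySem.List.maxD (unordered.filter (fun i => PySem.List.len (bm.getD i []) == minLen))
          (fun i => PySem.List.pyGetD joltage i 0) 0
      let order' := order ++ [i]
      -- unordered.remove(i); i is always a member, so remove = discard
      let unordered' := PySem.Set.discard unordered i
      -- for j in unordered: button_map[j] = tuple(b for b in button_map[j] if i not in b)
      let bm' := unordered'.foldl
        (fun d j => d.insert j ((d.getD j []).filter (fun b => !(b.contains i)))) bm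
      aLoop joltage fuel unordered' bm' order'

def build_button_map_py (joltage : List Int) (buttons : List (List Int)) :
    List Int × (List (Int × List (List Int))) :=
  let n : Int := PySem.List.len joltage
  -- for i in range(n): button_map[i] = tuple(b for b in buttons if i in b)
  let bm0 : PySem.Dict Int (List (List Int)) :=
    (PySem.List.pyRange 0 n 1).foldl
      (fun d i => d.insert i (buttons.filter (fun b => b.contains i))) PySem.Dict.empty
  let unordered0 : PySem.Set Int := PySem.Set.ofList (PySem.List.pyRange 0 n 1)
  let r := aLoop joltage unordered0.length unordered0 bm0 []
  (r.1, r.2.items)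

-- ===== PORT B =====
-- best = -1; for i in range(n): if pending[i] and (best < 0 or ...): best = i
def bSelect (joltage : List Int) (cnt : List Int) (pending : List Bool) : Int :=
  (PySem.List.pyRange 0 (PySem.List.len joltage) 1).foldl
    (fun best i =>
      if PySem.List.pyGetD pending i false &&
         (decide (best < 0) || decide (PySem.List.pyGetD cnt i 0 < PySem.List.pyGetD cnt best 0) ||
          (PySem.List.pyGetD cnt i 0 == PySem.List.pyGetD cnt best 0 &&
           decide (PySem.List.pyGetD joltage best 0 < PySem.List.pyGetD joltage i 0)))
      then i else best) (-1)

-- one iteration of B's main loop; state = (alive, cnt, pending, res, order)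
def bStep (joltage : List Int)
    (st : List (List Int) × List Int × List Bool × List (List (List Int)) × List Int) :
    List (List Int) × List Int × List Bool × List (List (List Int)) × List Int :=
  match st with
  | (alive, cnt, pending, res, order) =>
    let i := bSelect joltage cnt pending
    let pending' := PySem.List.pySetD pending i false
    let order' := order ++ [i]
    let ri := alive.filter (fun b => b.contains i)
    let res' := PySem.List.pySetD res i ri
    let alive' := alive.filter (fun b => !(b.contains i))
    let cnt' := ri.foldl (fun c b => b.foldl (fun c j =>
        if decide (0 ≤ j) && decide (j < PySem.List.len joltage) && PySem.List.pyGetD pending' j false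
        then PySem.List.pySetD c j (PySem.List.pyGetD c j 0 - 1) else c) c) cnt
    (alive', cnt', pending', res', order')

def build_button_map_py_alt (joltage : List Int) (buttons : List (List Int)) :
    List Int × (List (Int × List (List Int))) :=
  let n : Int := PySem.List.len joltage
  -- cnt = [sum(1 for b in buttons if i in b) for i in range(n)]
  let cnt0 : List Int := (PySem.List.pyRange 0 n 1).map (fun i => (buttons.countP (fun b => b.contains i) : Int))
  -- for _ in range(n): one bStep
  let st := (PySem.List.pyRange 0 n 1).foldl (fun st _ => bStep joltage st)
    (buttons, cnt0, List.replicate joltage.length true, List.replicate joltage.length ([] : List (List Int)), ([] : List Int))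
  (st.2.2.2.2, (PySem.List.pyRange 0 n 1).map (fun i => (i, PySem.List.pyGetD st.2.2.2.1 i [])))



-- ===== PRECONDITION & SPEC =====
-- Each button is a Python set; Pre_ only states that representation invariant (distinct
-- elements inside every button). It excludes no input the Python A accepts: the argument
-- type tuple[set[int], ...] guarantees it, and A returns normally on every input.
def Pre_build_button_map_py (joltage : List Int) (buttons : List (List Int)) : Prop :=
  ∀ b ∈ buttons, b.Nodup
instance (joltage : List Int) (buttons : List (List Int)) : Decidable (Pre_build_button_map_py joltage buttons) := by
  unfold Pre_build_button_map_py; infer_instance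

def pvWitness_build_button_map_py : List Int × List (List Int) := ([5, 3, 3], [[0, 2], [1], [0, 1, 2]])

def Spec_build_button_map_py (joltage : List Int) (buttons : List (List Int)) (out : List Int × (List (Int × List (List Int)))) : Prop := out = build_button_map_py_alt joltage buttons
instance (joltage : List Int) (buttons : List (List Int)) (out : List Int × (List (Int × List (List Int)))) : Decidable (Spec_build_button_map_py joltage buttons out) := by unfold Spec_build_button_map_py; infer_instance

-- ===== CLAIM (what is proved, stated in full; the proofs are below) =====
def Claim_equal_build_button_map_py : Prop := ∀ (joltage : List Int) (buttons : List (List Int)), Dom_build_button_map_py joltage buttons → Pre_build_button_map_py joltage buttons → Spec_build_button_map_py joltage buttons (build_button_map_py joltage buttons)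

-- ===== LEMMAS AND PROOFS =====



def pvKeep (P : List Int) (b : List Int) : Bool := !(P.any (fun p => b.contains p))
def pvGFilt (buttons : List (List Int)) (P : List Int) (k : Int) : List (List Int) :=
  buttons.filter (fun b => b.contains k && pvKeep P b)
def pvFrozen (P : List Int) (k : Int) : List Int := P.takeWhile (fun x => !(x == k))
def pvVal (buttons : List (List Int)) (P : List Int) (k : Int) : List (List Int) :=
  pvGFilt buttons (pvFrozen P k) k
def pvRangeL (m : Nat) : List Int := (List.range m).map (fun k : Nat => (k : Int))
def pvUnord (m : Nat) (P : List Int) : List Int := (pvRangeL m).filter (fun k => !(P.contains k))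

-- generic helpers
theorem filter_split_length {α : Type} (p : α → Bool) (l : List α) :
    (l.filter p).length + (l.filter (fun x => !(p x))).length = l.length := by
  induction l with
  | nil => rfl
  | cons x xs ih => by_cases h : p x <;> simp [List.filter_cons, h] <;> omega

theorem mem_pvRangeL (m : Nat) (k : Int) : k ∈ pvRangeL m ↔ 0 ≤ k ∧ k < m := by
  unfold pvRangeL
  rw [List.mem_map]
  constructor
  · rintro ⟨j, hj, hk⟩
    rw [List.mem_range] at hj
    omega
  · rintro ⟨h0, h1⟩
    exact ⟨k.toNat, List.mem_range.mpr (by omega), by omega⟩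

theorem nodup_pvRangeL (m : Nat) : (pvRangeL m).Nodup := by
  refine List.Nodup.map ?_ (List.nodup_range)
  intro a b h; simpa using h

theorem set_map_range {α : Type} (f : Nat → α) (m j : Nat) (hj : j < m) (v : α) :
    ((List.range m).map f).set j v = (List.range m).map (fun k => if k = j then v else f k) := by
  apply List.ext_getElem (by simp)
  intro k hk hk'
  simp only [List.length_map, List.length_range] at hk hk'
  rw [List.getElem_set]
  simp only [List.getElem_map, List.getElem_range]
  rcases eq_or_ne j k with h | h
  · rw [if_pos h, if_pos h.symm]
  · rw [if_neg h, if_neg (Ne.symm h)]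

theorem pyGet?_map_range {α : Type} (f : Nat → α) (m : Nat) (i : Int) (h0 : 0 ≤ i) (h1 : i < m) :
    PySem.List.pyGet? ((List.range m).map f) i = some (f i.toNat) := by
  rw [PySem.List.pyGet?_of_nonneg _ h0]
  rw [List.getElem?_map]
  rw [List.getElem?_range (by omega)]
  rfl

theorem pyGetD_map_range {α : Type} (f : Nat → α) (m : Nat) (i : Int) (d : α) (h0 : 0 ≤ i) (h1 : i < m) :
    PySem.List.pyGetD ((List.range m).map f) i d = f i.toNat := by
  simp [PySem.List.pyGetD, pyGet?_map_range f m i h0 h1]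

theorem pySetD_map_range {α : Type} (f : Nat → α) (m : Nat) (i : Int) (v : α) (h0 : 0 ≤ i) (h1 : i < m) :
    PySem.List.pySetD ((List.range m).map f) i v
      = (List.range m).map (fun k => if k = i.toNat then v else f k) := by
  rw [PySem.List.pySetD_of_nonneg _ _ h0, set_map_range f m i.toNat (by omega) v]

-- keep / gfilt / frozen step lemmas
theorem keep_append (P : List Int) (i : Int) (b : List Int) :
    pvKeep (P ++ [i]) b = (pvKeep P b && !(b.contains i)) := by
  simp [pvKeep, List.any_append]

theorem gfilt_append (buttons : List (List Int)) (P : List Int) (i k : Int) :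
    pvGFilt buttons (P ++ [i]) k = (pvGFilt buttons P k).filter (fun b => !(b.contains i)) := by
  simp only [pvGFilt, List.filter_filter]
  apply List.filter_congr
  intro b _
  rw [keep_append]
  cases b.contains k <;> cases b.contains i <;> cases pvKeep P b <;> rfl

theorem frozen_not_mem (P : List Int) (k : Int) (h : k ∉ P) : pvFrozen P k = P := by
  induction P with
  | nil => rfl
  | cons x xs ih =>
    simp only [List.mem_cons, not_or] at h
    simp only [pvFrozen, List.takeWhile_cons]
    rw [if_pos (by simp [Ne.symm h.1])]
    rw [show List.takeWhile (fun x => !(x == k)) xs = pvFrozen xs k from rfl, ih h.2]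

theorem frozen_append_last (P : List Int) (k : Int) (h : k ∉ P) : pvFrozen (P ++ [k]) k = P := by
  induction P with
  | nil => simp [pvFrozen]
  | cons x xs ih =>
    simp only [List.mem_cons, not_or] at h
    simp only [pvFrozen, List.cons_append, List.takeWhile_cons]
    rw [if_pos (by simp [Ne.symm h.1])]
    rw [show List.takeWhile (fun x => !(x == k)) (xs ++ [k]) = pvFrozen (xs ++ [k]) k from rfl, ih h.2]

theorem frozen_append_mem (P Q : List Int) (k : Int) (h : k ∈ P) : pvFrozen (P ++ Q) k = pvFrozen P k := by
  induction P with
  | nil => simp at h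
  | cons x xs ih =>
    simp only [pvFrozen, List.cons_append, List.takeWhile_cons]
    by_cases hx : x = k
    · rw [if_neg (by simp [hx]), if_neg (by simp [hx])]
    · rw [if_pos (by simp [hx]), if_pos (by simp [hx])]
      have : k ∈ xs := by rcases List.mem_cons.mp h with h' | h'; exact absurd h'.symm hx; exact h'
      rw [show List.takeWhile (fun x => !(x == k)) (xs ++ Q) = pvFrozen (xs ++ Q) k from rfl, ih this]
      rfl

theorem val_not_mem (buttons : List (List Int)) (P : List Int) (k : Int) (h : k ∉ P) :
    pvVal buttons P k = pvGFilt buttons P k := by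
  rw [pvVal, frozen_not_mem P k h]

theorem val_append_self (buttons : List (List Int)) (P : List Int) (i : Int) (h : i ∉ P) :
    pvVal buttons (P ++ [i]) i = pvGFilt buttons P i := by
  rw [pvVal, frozen_append_last P i h]

theorem val_append_mem (buttons : List (List Int)) (P : List Int) (i k : Int) (h : k ∈ P) :
    pvVal buttons (P ++ [i]) k = pvVal buttons P k := by
  rw [pvVal, frozen_append_mem P [i] k h]; rfl

theorem val_append_other (buttons : List (List Int)) (P : List Int) (i k : Int)
    (h : k ∉ P) (hik : k ≠ i) :
    pvVal buttons (P ++ [i]) k = (pvVal buttons P k).filter (fun b => !(b.contains i)) := by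
  have h2 : k ∉ P ++ [i] := by simp [h, hik]
  rw [val_not_mem _ _ _ h2, val_not_mem _ _ _ h, gfilt_append]

-- ---- Dict closed form ----
def mkR (m : Nat) (f : Int → List (List Int)) : PySem.Dict Int (List (List Int)) :=
  PySem.Dict.mk ((pvRangeL m).map (fun k => (k, f k)))

theorem mkR_congr (m : Nat) (f g : Int → List (List Int)) (h : ∀ k ∈ pvRangeL m, f k = g k) :
    mkR m f = mkR m g := by
  unfold mkR
  congr 1
  exact List.map_congr_left (fun k hk => by rw [h k hk])

theorem keys_mkR (m : Nat) (f : Int → List (List Int)) : (mkR m f).keys = pvRangeL m := by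
  simp [mkR, PySem.Dict.keys, List.map_map, Function.comp_def]

theorem contains_mkR (m : Nat) (f : Int → List (List Int)) (k : Int) (hk : k ∈ pvRangeL m) :
    (mkR m f).contains k = true := by
  rw [PySem.Dict.contains_iff_mem_keys, keys_mkR]; exact hk

theorem mkR_getD (m : Nat) (f : Int → List (List Int)) (k : Int) (hk : k ∈ pvRangeL m) (d : List (List Int)) :
    (mkR m f).getD k d = f k := by
  apply PySem.Dict.getD_of_mem_items
  · simp only [mkR]
    exact List.mem_map.mpr ⟨k, hk, rfl⟩
  · rw [keys_mkR]; exact nodup_pvRangeL m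

theorem mkR_insert (m : Nat) (f : Int → List (List Int)) (k : Int) (hk : k ∈ pvRangeL m) (v : List (List Int)) :
    (mkR m f).insert k v = mkR m (fun j => if j = k then v else f j) := by
  apply PySem.Dict.ext
  rw [PySem.Dict.items_insert_of_contains _ v (contains_mkR m f k hk)]
  show ((pvRangeL m).map (fun j => (j, f j))).map _ = (pvRangeL m).map _
  rw [List.map_map]
  apply List.map_congr_left
  intro j _
  by_cases hj : j = k
  · subst hj; simp
  · simp [hj, (by simpa using hj : (j == k) = false)]

theorem filter_idem {α : Type} (q : α → Bool) (l : List α) : (l.filter q).filter q = l.filter q := by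
  rw [List.filter_filter]
  exact List.filter_congr (fun a _ => by cases q a <;> rfl)

theorem mkR_update_fold (m : Nat) (q : List Int → Bool) :
    ∀ (l : List Int), (∀ j ∈ l, j ∈ pvRangeL m) → ∀ (f : Int → List (List Int)),
    l.foldl (fun d j => d.insert j ((d.getD j []).filter q)) (mkR m f)
      = mkR m (fun k => if l.contains k then (f k).filter q else f k) := by
  intro l
  induction l with
  | nil =>
    intro _ f
    simp only [List.foldl_nil]
    exact (mkR_congr m _ _ (fun k _ => by simp)).symm
  | cons j rest ih =>
    intro hl f
    have hj : j ∈ pvRangeL m := hl j (by simp)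
    rw [List.foldl_cons, mkR_getD m f j hj, mkR_insert m f j hj]
    rw [ih (fun x hx => hl x (by simp [hx]))]
    apply mkR_congr
    intro k _
    by_cases hk : k = j
    · subst hk
      simp only [if_pos rfl, List.contains_cons, BEq.rfl, Bool.true_or, if_true]
      by_cases hr : rest.contains k
      · rw [if_pos hr, filter_idem]
      · rw [if_neg (by simp_all)]
    · have : (k == j) = false := by simpa using hk
      simp only [if_neg hk, List.contains_cons, this, Bool.false_or]

-- ---- unordered set ----
theorem unord_discard (m : Nat) (P : List Int) (i : Int) :
    pvUnord m (P ++ [i]) = PySem.Set.discard (pvUnord m P) i := by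
  simp only [pvUnord, PySem.Set.discard, List.filter_filter]
  apply List.filter_congr
  intro k _
  simp only [List.contains_append]
  cases hP : P.contains k <;> cases hk : k == i <;> simp_all

theorem mem_pvUnord (m : Nat) (P : List Int) (k : Int) :
    k ∈ pvUnord m P ↔ (0 ≤ k ∧ k < m) ∧ k ∉ P := by
  simp only [pvUnord, List.mem_filter, mem_pvRangeL]
  simp only [List.contains_eq_mem, Bool.not_eq_eq_eq_not, Bool.not_true, decide_eq_false_iff_not]

theorem length_pvUnord (m : Nat) (P : List Int) (hnd : P.Nodup) (hsub : ∀ p ∈ P, p ∈ pvRangeL m) :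
    (pvUnord m P).length + P.length = m := by
  have hsplit := filter_split_length (fun k => P.contains k) (pvRangeL m)
  have hperm : List.Perm ((pvRangeL m).filter (fun k => P.contains k)) P := by
    rw [List.perm_ext_iff_of_nodup ((nodup_pvRangeL m).filter _) hnd]
    intro a
    simp only [List.mem_filter, List.contains_eq_mem, decide_eq_true_eq]
    exact ⟨fun h => h.2, fun h => ⟨hsub a h, h⟩⟩
  have hlen := hperm.length_eq
  have : (pvRangeL m).length = m := by simp [pvRangeL]
  simp only [pvUnord]
  omega

-- ---- counting ----
theorem length_filter_not {α : Type} (q : α → Bool) (l : List α) :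
    (l.filter (fun x => !(q x))).length = l.length - l.countP q := by
  have h := filter_split_length q l
  have h2 : l.countP q = (l.filter q).length := List.countP_eq_length_filter
  omega

theorem countP_swap (buttons : List (List Int)) (P : List Int) (i k : Int) :
    (pvGFilt buttons P k).countP (fun b => b.contains i)
      = (pvGFilt buttons P i).countP (fun b => b.contains k) := by
  simp only [pvGFilt, List.countP_filter]
  apply List.countP_congr
  intro b _
  cases b.contains i <;> cases b.contains k <;> cases pvKeep P b <;> simp

theorem cnt_step (buttons : List (List Int)) (P : List Int) (i k : Int) :
    ((pvGFilt buttons (P ++ [i]) k).length : Int)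
      = (pvGFilt buttons P k).length - ((pvGFilt buttons P i).countP (fun b => b.contains k) : Int) := by
  rw [gfilt_append, ← countP_swap]
  have hle : (pvGFilt buttons P k).countP (fun b => b.contains i) ≤ (pvGFilt buttons P k).length :=
    List.countP_le_length
  have := length_filter_not (fun b => b.contains i) (pvGFilt buttons P k)
  omega

-- ---- B's count-decrement loops ----
theorem cnt_inner (m : Nat) (p : Int → Bool) (pl : List Bool)
    (hpl : ∀ j : Int, 0 ≤ j → j < m → PySem.List.pyGetD pl j false = p j) :
    ∀ (b : List Int), b.Nodup → ∀ (f : Nat → Int),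
    b.foldl (fun c j =>
        if decide (0 ≤ j) && decide (j < (m : Int)) && PySem.List.pyGetD pl j false
        then PySem.List.pySetD c j (PySem.List.pyGetD c j 0 - 1) else c) ((List.range m).map f)
      = (List.range m).map (fun k : Nat => if b.contains (k : Int) && p (k : Int) then f k - 1 else f k) := by
  intro b
  induction b with
  | nil =>
    intro _ f
    simp only [List.foldl_nil]
    exact (List.map_congr_left (fun k _ => by simp)).symm
  | cons j rest ih =>
    intro hnd f
    have hjr : j ∉ rest := (List.nodup_cons.mp hnd).1
    have hrest : rest.Nodup := (List.nodup_cons.mp hnd).2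
    rw [List.foldl_cons]
    by_cases hj0 : 0 ≤ j
    · by_cases hj1 : j < (m : Int)
      · rw [hpl j hj0 hj1]
        by_cases hp : p j = true
        · rw [if_pos (by simp [hj0, hj1, hp])]
          rw [pyGetD_map_range f m j 0 hj0 hj1, pySetD_map_range f m j _ hj0 hj1]
          rw [ih hrest]
          apply List.map_congr_left
          intro k hk
          rw [List.mem_range] at hk
          by_cases hkj : (k : Int) = j
          · have hcr : rest.contains (k : Int) = false := by
              simp only [List.contains_eq_mem, decide_eq_false_iff_not]
              rw [hkj]; exact hjr
            have hc : (j :: rest).contains (k : Int) = true := by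
              simp [List.contains_cons, hkj]
            have hkn : k = j.toNat := by omega
            subst hkn
            simp [hcr, hkj, hp, hc, hjr]
          · have hkn : ¬ (k = j.toNat) := by omega
            rw [if_neg hkn]
            have : (j :: rest).contains (k : Int) = rest.contains (k : Int) := by
              simp [List.contains_cons, hkj]
            rw [this]
        · rw [if_neg (by simp [hp])]
          rw [ih hrest]
          apply List.map_congr_left
          intro k hk
          by_cases hkj : (k : Int) = j
          · have hcr : rest.contains (k : Int) = false := by
              simp only [List.contains_eq_mem, decide_eq_false_iff_not]
              rw [hkj]; exact hjr
            have hpk : p (k : Int) = false := by rw [hkj]; simpa using hp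
            simp [hcr, hpk]
          · have : (j :: rest).contains (k : Int) = rest.contains (k : Int) := by
              simp [List.contains_cons, hkj]
            rw [this]
      · rw [if_neg (by simp [hj1])]
        rw [ih hrest]
        apply List.map_congr_left
        intro k hk
        rw [List.mem_range] at hk
        have hkj : ¬ ((k : Int) = j) := by omega
        have : (j :: rest).contains (k : Int) = rest.contains (k : Int) := by
          simp [List.contains_cons, hkj]
        rw [this]
    · rw [if_neg (by simp [hj0])]
      rw [ih hrest]
      apply List.map_congr_left
      intro k hk
      have hkj : ¬ ((k : Int) = j) := by omega
      have : (j :: rest).contains (k : Int) = rest.contains (k : Int) := by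
        simp [List.contains_cons, hkj]
      rw [this]

theorem cnt_outer (m : Nat) (p : Int → Bool) (pl : List Bool)
    (hpl : ∀ j : Int, 0 ≤ j → j < m → PySem.List.pyGetD pl j false = p j) :
    ∀ (bs : List (List Int)), (∀ b ∈ bs, b.Nodup) → ∀ (f : Nat → Int),
    bs.foldl (fun c b => b.foldl (fun c j =>
        if decide (0 ≤ j) && decide (j < (m : Int)) && PySem.List.pyGetD pl j false
        then PySem.List.pySetD c j (PySem.List.pyGetD c j 0 - 1) else c) c) ((List.range m).map f)
      = (List.range m).map (fun k : Nat =>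
          if p (k : Int) then f k - (bs.countP (fun b => b.contains (k : Int)) : Int) else f k) := by
  intro bs
  induction bs with
  | nil =>
    intro _ f
    simp only [List.foldl_nil]
    exact (List.map_congr_left (fun k _ => by simp)).symm
  | cons b rest ih =>
    intro hbs f
    rw [List.foldl_cons, cnt_inner m p pl hpl b (hbs b (by simp)) f]
    rw [ih (fun x hx => hbs x (by simp [hx]))]
    apply List.map_congr_left
    intro k _
    by_cases hp : p (k : Int) = true
    · by_cases hc : b.contains (k : Int) = true
      · have hm : (k : Int) ∈ b := by simpa using hc
        simp [hp, hc, List.countP_cons, hm]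
        omega
      · have hm : (k : Int) ∉ b := by simpa using hc
        simp [hp, List.countP_cons, hm]
    · have hp' : p (k : Int) = false := by simpa using hp
      simp [hp']

-- ===== SEL =====


def pvSelStep (c g : Int → Int) (best x : Int) : Int :=
  if decide (best < 0) || decide (c x < c best) || (c x == c best && decide (g best < g x)) then x else best
def pvBetStep (c g : Int → Int) (best x : Int) : Int :=
  if decide (c x < c best) || (c x == c best && decide (g best < g x)) then x else best

def mfold (c : Int → Int) (a : Int) (l : List Int) : Int :=
  l.foldl (fun m x => if c x < m then c x else m) a
def gfold (g : Int → Int) (y : Int) (l : List Int) : Int :=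
  l.foldl (fun w x => if g w < g x then x else w) y

theorem min?_cons (c : Int → Int) (y : Int) (l : List Int) :
    PySem.List.min? ((y::l).map c) (fun v => v) = some (mfold c (c y) l) := by
  induction l generalizing y with
  | nil => rfl
  | cons x xs ih =>
    have h1 : PySem.List.min? ((y::x::xs).map c) (fun v => v)
        = PySem.List.min? (((if c x < c y then x else y)::xs).map c) (fun v => v) := by
      simp only [PySem.List.min?, List.map_cons, List.foldl_cons]
      congr 1
      by_cases h : c x < c y <;> simp [h]
    rw [h1, ih]
    congr 1
    simp only [mfold, List.foldl_cons]
    by_cases h : c x < c y <;> simp [h]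

theorem max?_cons (g : Int → Int) (y : Int) (l : List Int) :
    PySem.List.max? (y::l) g = some (gfold g y l) := by
  induction l generalizing y with
  | nil => rfl
  | cons x xs ih =>
    have h1 : PySem.List.max? (y::x::xs) g = PySem.List.max? ((if g y < g x then x else y)::xs) g := by
      simp only [PySem.List.max?, List.foldl_cons]
      congr 1
      by_cases h : g y < g x <;> simp [h]
    rw [h1, ih]
    simp only [gfold, List.foldl_cons]

theorem mfold_le_init (c : Int → Int) (l : List Int) : ∀ a, mfold c a l ≤ a := by
  induction l with
  | nil => intro a; simp [mfold]
  | cons x xs ih =>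
    intro a
    simp only [mfold, List.foldl_cons]
    by_cases h : c x < a
    · simp only [if_pos h]; exact le_trans (ih (c x)) (le_of_lt h)
    · simp only [if_neg h]; exact ih a

def Atp (c g : Int → Int) (l : List Int) : Int :=
  PySem.List.maxD (l.filter (fun x => c x == (PySem.List.min? (l.map c) (fun v => v)).getD 0)) g 0

theorem cBet (c g : Int → Int) (b x : Int) :
    c (pvBetStep c g b x) = if c x < c b then c x else c b := by
  unfold pvBetStep
  split_ifs with h1 h2 <;> simp_all

theorem atp_step (c g : Int → Int) (b x : Int) (xs : List Int) :
    Atp c g (b::x::xs) = Atp c g (pvBetStep c g b x :: xs) := by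
  have hb' : c (pvBetStep c g b x) = if c x < c b then c x else c b := cBet c g b x
  unfold Atp
  rw [min?_cons, min?_cons, hb']
  have hMn : mfold c (c b) (x::xs) = mfold c (if c x < c b then c x else c b) xs := by
    simp [mfold, List.foldl_cons]
  rw [hMn]
  set m := mfold c (if c x < c b then c x else c b) xs with hm
  have hmle : m ≤ if c x < c b then c x else c b := mfold_le_init c xs _
  simp only [Option.getD_some]
  by_cases hb : c b = m <;> by_cases hx : c x = m
  · -- c b = c x = m
    have hxb : ¬ (c x < c b) := by omega
    have hstep : pvBetStep c g b x = if g b < g x then x else b := by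
      unfold pvBetStep
      have : (c x == c b) = true := by simp; omega
      simp [hxb, this]
    rw [hstep]
    have hfilter : (b::x::xs).filter (fun y => c y == m) = b :: x :: xs.filter (fun y => c y == m) := by
      simp [List.filter_cons, hb, hx]
    rw [hfilter]
    have hfilter2 : ((if g b < g x then x else b)::xs).filter (fun y => c y == m)
        = (if g b < g x then x else b) :: xs.filter (fun y => c y == m) := by
      by_cases hg : g b < g x <;> simp [List.filter_cons, hb, hx, hg]
    rw [hfilter2]
    simp only [PySem.List.maxD]
    rw [max?_cons, max?_cons]
    simp only [Option.getD_some, gfold, List.foldl_cons]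
  · -- c b = m, c x ≠ m
    have hxb : ¬ (c x < c b) := by
      intro h; rw [if_pos h] at hmle; omega
    have hstep : pvBetStep c g b x = b := by
      unfold pvBetStep
      have : (c x == c b) = false := by simp; omega
      simp [hxb, this]
    rw [hstep]
    have : (b::x::xs).filter (fun y => c y == m) = (b::xs).filter (fun y => c y == m) := by
      simp [List.filter_cons, hb, hx]
    rw [this]
  · -- c x = m, c b ≠ m
    have hxb : c x < c b := by
      by_contra h; rw [if_neg h] at hmle; omega
    have hstep : pvBetStep c g b x = x := by
      unfold pvBetStep; simp [hxb]
    rw [hstep]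
    have : (b::x::xs).filter (fun y => c y == m) = (x::xs).filter (fun y => c y == m) := by
      simp [List.filter_cons, hb, hx]
    rw [this]
  · -- neither
    have hstep : pvBetStep c g b x = x ∨ pvBetStep c g b x = b := by
      unfold pvBetStep; split_ifs <;> simp
    have h1 : (b::x::xs).filter (fun y => c y == m) = xs.filter (fun y => c y == m) := by
      simp [List.filter_cons, hb, hx]
    have h2 : (pvBetStep c g b x::xs).filter (fun y => c y == m) = xs.filter (fun y => c y == m) := by
      rcases hstep with h | h <;> rw [h] <;> simp [List.filter_cons, hb, hx]
    rw [h1, h2]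

theorem bet_eq_atp (c g : Int → Int) (l : List Int) : ∀ b, l.foldl (pvBetStep c g) b = Atp c g (b::l) := by
  induction l with
  | nil =>
    intro b
    simp only [List.foldl_nil, Atp, List.map_cons, List.map_nil]
    simp [PySem.List.maxD, PySem.List.max?, PySem.List.min?]
  | cons x xs ih =>
    intro b
    rw [List.foldl_cons, ih (pvBetStep c g b x), ← atp_step]

theorem sel_eq_bet (c g : Int → Int) (l : List Int) : ∀ b, 0 ≤ b → (∀ x ∈ l, 0 ≤ x) →
    l.foldl (pvSelStep c g) b = l.foldl (pvBetStep c g) b := by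
  induction l with
  | nil => intros; rfl
  | cons x xs ih =>
    intro b hb hl
    have hx : 0 ≤ x := hl x (by simp)
    have h1 : pvSelStep c g b x = pvBetStep c g b x := by
      unfold pvSelStep pvBetStep
      have : decide (b < 0) = false := by simp; omega
      rw [this, Bool.false_or]
    rw [List.foldl_cons, List.foldl_cons, h1]
    have hb' : 0 ≤ pvBetStep c g b x := by
      unfold pvBetStep; split_ifs <;> assumption
    exact ih _ hb' (fun y hy => hl y (by simp [hy]))

theorem sel_master (c g : Int → Int) (u : Int) (us : List Int) (hu : 0 ≤ u) (hus : ∀ x ∈ us, 0 ≤ x) :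
    PySem.List.maxD ((u::us).filter (fun x =>
        c x == (PySem.List.min? ((u::us).map c) (fun v => v)).getD 0)) g 0
      = (u::us).foldl (pvSelStep c g) (-1) := by
  have h0 : (u::us).foldl (pvSelStep c g) (-1) = us.foldl (pvSelStep c g) u := by
    rw [List.foldl_cons]
    congr 1
  rw [h0, sel_eq_bet c g us u hu hus, bet_eq_atp]
  rfl

def pendF (m : Nat) (P : List Int) : List Bool := (List.range m).map (fun k : Nat => !(P.contains (k : Int)))
def cntF (buttons : List (List Int)) (m : Nat) (P : List Int) : List Int :=
  (List.range m).map (fun k : Nat => ((pvVal buttons P (k : Int)).length : Int))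
def resF (buttons : List (List Int)) (m : Nat) (P : List Int) : List (List (List Int)) :=
  (List.range m).map (fun k : Nat => if P.contains (k : Int) then pvVal buttons P (k : Int) else [])
def aliveF (buttons : List (List Int)) (P : List Int) : List (List Int) := buttons.filter (pvKeep P)
def pvInv (m : Nat) (P : List Int) : Prop := P.Nodup ∧ ∀ p ∈ P, p ∈ pvRangeL m

-- ===== pick / greedy =====
def pvCkey (buttons : List (List Int)) (P : List Int) (k : Int) : Int := ((pvGFilt buttons P k).length : Int)
def pvGkey (joltage : List Int) (k : Int) : Int := PySem.List.pyGetD joltage k 0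

def pvPick (joltage : List Int) (buttons : List (List Int)) (P : List Int) : Int :=
  (pvUnord joltage.length P).foldl (pvSelStep (pvCkey buttons P) (pvGkey joltage)) (-1)

def pvGreedy (joltage : List Int) (buttons : List (List Int)) : Nat → List Int → List Int
  | 0, P => P
  | f+1, P => pvGreedy joltage buttons f (P ++ [pvPick joltage buttons P])

theorem foldl_selStep_mem (c g : Int → Int) (l : List Int) : ∀ b, l.foldl (pvSelStep c g) b ∈ b :: l := by
  induction l with
  | nil => intro b; simp
  | cons x xs ih =>
    intro b
    rw [List.foldl_cons]
    have h1 := ih (pvSelStep c g b x)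
    have h2 : pvSelStep c g b x = x ∨ pvSelStep c g b x = b := by
      unfold pvSelStep; split_ifs <;> simp
    rcases List.mem_cons.mp h1 with h | h
    · rw [h]
      rcases h2 with h' | h' <;> rw [h'] <;> simp
    · simp [h]

theorem selStep_neg_one (c g : Int → Int) (x : Int) : pvSelStep c g (-1) x = x := by
  unfold pvSelStep
  rw [if_pos (by simp)]

theorem pick_mem (joltage : List Int) (buttons : List (List Int)) (P : List Int) (hne : pvUnord joltage.length P ≠ []) :
    pvPick joltage buttons P ∈ pvUnord joltage.length P := by
  unfold pvPick
  rcases hu : pvUnord joltage.length P with _ | ⟨u, us⟩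
  · exact absurd hu hne
  · rw [List.foldl_cons, selStep_neg_one]
    exact foldl_selStep_mem _ _ us u

-- ===== selection congruence, A side =====
theorem aSel_eq (joltage : List Int) (buttons : List (List Int)) (P : List Int) (hne : pvUnord joltage.length P ≠ []) :
    PySem.List.maxD ((pvUnord joltage.length P).filter (fun i =>
        PySem.List.len ((mkR joltage.length (pvVal buttons P)).getD i []) ==
          ((PySem.List.min? ((pvUnord joltage.length P).map (fun i =>
            PySem.List.len ((mkR joltage.length (pvVal buttons P)).getD i []))) (fun v => v)).getD 0)))
      (fun i => PySem.List.pyGetD joltage i 0) 0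
      = pvPick joltage buttons P := by
  have hlen : ∀ i ∈ pvUnord joltage.length P,
      PySem.List.len ((mkR joltage.length (pvVal buttons P)).getD i []) = pvCkey buttons P i := by
    intro i hi
    rw [mem_pvUnord] at hi
    rw [mkR_getD _ _ i ((mem_pvRangeL _ i).mpr hi.1)]
    rw [PySem.List.len_eq]
    rw [pvVal, frozen_not_mem P i hi.2]
    rfl
  rcases hu : pvUnord joltage.length P with _ | ⟨u, us⟩
  · exact absurd hu hne
  · have hmap : (u::us).map (fun i =>
        PySem.List.len ((mkR joltage.length (pvVal buttons P)).getD i [])) = (u::us).map (pvCkey buttons P) :=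
      List.map_congr_left (fun i hi => hlen i (hu ▸ hi))
    have hfil : ∀ (M : Int), (u::us).filter (fun i =>
        PySem.List.len ((mkR joltage.length (pvVal buttons P)).getD i []) == M)
          = (u::us).filter (fun i => pvCkey buttons P i == M) := by
      intro M
      exact List.filter_congr (fun i hi => by rw [hlen i (hu ▸ hi)])
    rw [hmap, hfil]
    have hu0 : 0 ≤ u := by
      have : u ∈ pvUnord joltage.length P := by rw [hu]; simp
      exact ((mem_pvUnord _ _ _).mp this).1.1
    have hus : ∀ x ∈ us, 0 ≤ x := by
      intro x hx
      have : x ∈ pvUnord joltage.length P := by rw [hu]; simp [hx]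
      exact ((mem_pvUnord _ _ _).mp this).1.1
    rw [sel_master (pvCkey buttons P) (fun i => PySem.List.pyGetD joltage i 0) u us hu0 hus]
    unfold pvPick
    rw [hu]
    rfl

-- ===== selection congruence, B side =====
theorem cnt_lookup (joltage : List Int) (buttons : List (List Int)) (P : List Int) (y : Int)
    (hy : y ∈ pvUnord joltage.length P) :
    PySem.List.pyGetD (cntF buttons joltage.length P) y 0 = pvCkey buttons P y := by
  rw [mem_pvUnord] at hy
  unfold cntF
  rw [pyGetD_map_range _ _ y 0 hy.1.1 hy.1.2]
  rw [show ((y.toNat : Nat) : Int) = y from Int.toNat_of_nonneg hy.1.1]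
  rw [pvVal, frozen_not_mem P y hy.2]
  rfl

theorem bsel_fold (joltage : List Int) (buttons : List (List Int)) (P : List Int) :
    ∀ (l : List Int), (∀ x ∈ l, x ∈ pvUnord joltage.length P) →
    ∀ b, (b = -1 ∨ b ∈ pvUnord joltage.length P) →
    l.foldl (fun best i =>
      if decide (best < 0) ||
         decide (PySem.List.pyGetD (cntF buttons joltage.length P) i 0 <
           PySem.List.pyGetD (cntF buttons joltage.length P) best 0) ||
         (PySem.List.pyGetD (cntF buttons joltage.length P) i 0 ==
           PySem.List.pyGetD (cntF buttons joltage.length P) best 0 &&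
          decide (PySem.List.pyGetD joltage best 0 < PySem.List.pyGetD joltage i 0))
      then i else best) b
      = l.foldl (pvSelStep (pvCkey buttons P) (pvGkey joltage)) b := by
  intro l
  induction l with
  | nil => intro _ b _; rfl
  | cons x xs ih =>
    intro hl b hb
    have hx : x ∈ pvUnord joltage.length P := hl x (by simp)
    rw [List.foldl_cons, List.foldl_cons]
    have hstep : (if decide (b < 0) ||
         decide (PySem.List.pyGetD (cntF buttons joltage.length P) x 0 <
           PySem.List.pyGetD (cntF buttons joltage.length P) b 0) ||
         (PySem.List.pyGetD (cntF buttons joltage.length P) x 0 ==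
           PySem.List.pyGetD (cntF buttons joltage.length P) b 0 &&
          decide (PySem.List.pyGetD joltage b 0 < PySem.List.pyGetD joltage x 0))
        then x else b) = pvSelStep (pvCkey buttons P) (pvGkey joltage) b x := by
      rcases hb with hb | hb
      · subst hb
        rw [selStep_neg_one]
        rw [if_pos (by simp)]
      · have hb0 : ¬ (b < 0) := by
          have := ((mem_pvUnord _ _ _).mp hb).1.1
          omega
        rw [cnt_lookup joltage buttons P x hx, cnt_lookup joltage buttons P b hb]
        unfold pvSelStep pvGkey
        rw [show (decide (b < 0)) = false by simpa using hb0]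
    rw [hstep]
    have hnew : pvSelStep (pvCkey buttons P) (pvGkey joltage) b x = x ∨
        pvSelStep (pvCkey buttons P) (pvGkey joltage) b x = b := by
      unfold pvSelStep; split_ifs <;> simp
    apply ih (fun y hy => hl y (by simp [hy]))
    rcases hnew with h | h
    · rw [h]; exact Or.inr hx
    · rw [h]; exact hb

theorem bSel_eq (joltage : List Int) (buttons : List (List Int)) (P : List Int) :
    bSelect joltage (cntF buttons joltage.length P) (pendF joltage.length P)
      = pvPick joltage buttons P := by
  unfold bSelect
  rw [PySem.List.len_eq, PySem.List.pyRange_zero_natCast]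
  have hpend : ∀ k ∈ pvRangeL joltage.length,
      PySem.List.pyGetD (pendF joltage.length P) k false = !(P.contains k) := by
    intro k hk
    rw [mem_pvRangeL] at hk
    unfold pendF
    rw [pyGetD_map_range _ _ k false hk.1 hk.2]
    rw [show ((k.toNat : Nat) : Int) = k from Int.toNat_of_nonneg hk.1]
  have hsplit : ((List.range joltage.length).map (fun k : Nat => (k : Int))).foldl (fun best i =>
      if PySem.List.pyGetD (pendF joltage.length P) i false &&
         (decide (best < 0) ||
          decide (PySem.List.pyGetD (cntF buttons joltage.length P) i 0 <
            PySem.List.pyGetD (cntF buttons joltage.length P) best 0) ||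
          (PySem.List.pyGetD (cntF buttons joltage.length P) i 0 ==
            PySem.List.pyGetD (cntF buttons joltage.length P) best 0 &&
           decide (PySem.List.pyGetD joltage best 0 < PySem.List.pyGetD joltage i 0)))
      then i else best) (-1)
      = (pvRangeL joltage.length).foldl (fun best i =>
        if PySem.List.pyGetD (pendF joltage.length P) i false
        then (if decide (best < 0) ||
          decide (PySem.List.pyGetD (cntF buttons joltage.length P) i 0 <
            PySem.List.pyGetD (cntF buttons joltage.length P) best 0) ||
          (PySem.List.pyGetD (cntF buttons joltage.length P) i 0 ==
            PySem.List.pyGetD (cntF buttons joltage.length P) best 0 &&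
           decide (PySem.List.pyGetD joltage best 0 < PySem.List.pyGetD joltage i 0))
          then i else best) else best) (-1) := by
    apply PySem.List.foldl_congr_mem
    intro acc y _
    cases PySem.List.pyGetD (pendF joltage.length P) y false <;> simp
  rw [hsplit, PySem.List.foldl_if_eq_foldl_filter]
  rw [show (pvRangeL joltage.length).filter
        (fun i => PySem.List.pyGetD (pendF joltage.length P) i false) = pvUnord joltage.length P by
    unfold pvUnord
    exact List.filter_congr (fun k hk => hpend k hk)]
  exact bsel_fold joltage buttons P _ (fun x hx => hx) (-1) (Or.inl rfl)

-- ===== step lemma, A =====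
theorem aStep_eq (joltage : List Int) (buttons : List (List Int)) (P : List Int) (fuel : Nat)
    (hInv : pvInv joltage.length P) (hlt : P.length < joltage.length) :
    aLoop joltage (fuel+1) (pvUnord joltage.length P) (mkR joltage.length (pvVal buttons P)) P
      = aLoop joltage fuel (pvUnord joltage.length (P ++ [pvPick joltage buttons P]))
          (mkR joltage.length (pvVal buttons (P ++ [pvPick joltage buttons P])))
          (P ++ [pvPick joltage buttons P]) := by
  have hlen := length_pvUnord joltage.length P hInv.1 hInv.2
  have hne : pvUnord joltage.length P ≠ [] := by
    intro h
    rw [h] at hlen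
    simp at hlen
    omega
  set i := pvPick joltage buttons P with hidef
  have hiU : i ∈ pvUnord joltage.length P := pick_mem joltage buttons P hne
  have hiR : i ∈ pvRangeL joltage.length := by
    rw [mem_pvRangeL]
    exact ((mem_pvUnord _ _ _).mp hiU).1
  have hiP : i ∉ P := ((mem_pvUnord _ _ _).mp hiU).2
  rw [aLoop]
  rw [if_neg (by simpa [List.isEmpty_iff] using hne)]
  simp only []
  rw [aSel_eq joltage buttons P hne]
  rw [← hidef]
  rw [← unord_discard joltage.length P i]
  have hfold : (pvUnord joltage.length (P ++ [i])).foldl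
      (fun d j => d.insert j ((d.getD j []).filter (fun b => !(b.contains i))))
      (mkR joltage.length (pvVal buttons P))
      = mkR joltage.length (pvVal buttons (P ++ [i])) := by
    rw [mkR_update_fold joltage.length (fun b => !(b.contains i)) (pvUnord joltage.length (P ++ [i]))
      (fun j hj => List.mem_of_mem_filter hj) (pvVal buttons P)]
    apply mkR_congr
    intro k hk
    by_cases hkU : (pvUnord joltage.length (P ++ [i])).contains k
    · rw [if_pos hkU]
      have hkm := (mem_pvUnord _ _ _).mp (by simpa using hkU)
      have hkP : k ∉ P := fun h => hkm.2 (by simp [h])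
      have hki : k ≠ i := fun h => hkm.2 (by simp [h])
      rw [val_append_other buttons P i k hkP hki]
    · rw [if_neg (by simpa using hkU)]
      have hkP' : k ∈ P ++ [i] := by
        by_contra h
        have : k ∈ pvUnord joltage.length (P ++ [i]) := by
          rw [mem_pvUnord]
          exact ⟨(mem_pvRangeL _ _).mp hk, h⟩
        simp only [List.contains_eq_mem] at hkU
        exact hkU (by simpa using this)
      rcases List.mem_append.mp hkP' with h | h
      · exact (val_append_mem buttons P i k h).symm
      · have hki : k = i := by simpa using h
        subst hki
        rw [val_append_self buttons P i hiP, val_not_mem buttons P i hiP]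
  rw [hfold]

-- ===== master, A =====
theorem aLoop_master (joltage : List Int) (buttons : List (List Int)) :
    ∀ (fuel : Nat) (P : List Int), pvInv joltage.length P → fuel + P.length = joltage.length →
    aLoop joltage fuel (pvUnord joltage.length P) (mkR joltage.length (pvVal buttons P)) P
      = (pvGreedy joltage buttons fuel P,
         mkR joltage.length (pvVal buttons (pvGreedy joltage buttons fuel P))) := by
  intro fuel
  induction fuel with
  | zero => intro P _ _; rfl
  | succ f ih =>
    intro P hInv hfuel
    rw [aStep_eq joltage buttons P f hInv (by omega)]
    have hlen := length_pvUnord joltage.length P hInv.1 hInv.2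
    have hne : pvUnord joltage.length P ≠ [] := by
      intro h; rw [h] at hlen; simp at hlen; omega
    have hiU := pick_mem joltage buttons P hne
    have hiM := (mem_pvUnord _ _ _).mp hiU
    have hInv' : pvInv joltage.length (P ++ [pvPick joltage buttons P]) := by
      constructor
      · rw [List.nodup_append]
        refine ⟨hInv.1, List.nodup_singleton _, ?_⟩
        intro a ha b hb
        have hbp : b = pvPick joltage buttons P := by simpa using hb
        subst hbp
        intro hab
        exact hiM.2 (hab ▸ ha)
      · intro p hp
        rcases List.mem_append.mp hp with h | h
        · exact hInv.2 p h
        · have : p = pvPick joltage buttons P := by simpa using h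
          subst this
          exact (mem_pvRangeL _ _).mpr hiM.1
    rw [ih _ hInv' (by simp; omega)]
    rfl

-- ===== step components, B =====
theorem alive_filter (buttons : List (List Int)) (P : List Int) (i : Int) :
    (aliveF buttons P).filter (fun b => b.contains i) = pvGFilt buttons P i := by
  unfold aliveF pvGFilt
  rw [List.filter_filter]

theorem alive_step (buttons : List (List Int)) (P : List Int) (i : Int) :
    (aliveF buttons P).filter (fun b => !(b.contains i)) = aliveF buttons (P ++ [i]) := by
  unfold aliveF
  rw [List.filter_filter]
  exact (List.filter_congr (fun b _ => by
    rw [keep_append]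
    cases b.contains i <;> cases pvKeep P b <;> rfl)).symm


theorem contains_append_cast (P : List Int) (i : Int) (k : Nat) :
    (P ++ [i]).contains (k : Int) = (P.contains (k : Int) || ((k : Int) == i)) := by
  rw [List.contains_append]
  have : [i].contains (k : Int) = ((k : Int) == i) := by
    simp [List.contains_eq_mem, Bool.beq_eq_decide_eq]
  rw [this]

theorem pend_step (m : Nat) (P : List Int) (i : Int) (h0 : 0 ≤ i) (h1 : i < m) :
    PySem.List.pySetD (pendF m P) i false = pendF m (P ++ [i]) := by
  unfold pendF
  rw [pySetD_map_range _ m i false h0 h1]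
  apply List.map_congr_left
  intro k hk
  rw [contains_append_cast]
  by_cases hki : k = i.toNat
  · have : ((k : Int) == i) = true := by simp; omega
    rw [if_pos hki, this]
    simp
  · have : ((k : Int) == i) = false := by simp; omega
    rw [if_neg hki, this]
    simp

theorem res_step (buttons : List (List Int)) (m : Nat) (P : List Int) (i : Int)
    (h0 : 0 ≤ i) (h1 : i < m) (hiP : i ∉ P) :
    PySem.List.pySetD (resF buttons m P) i (pvGFilt buttons P i) = resF buttons m (P ++ [i]) := by
  unfold resF
  rw [pySetD_map_range _ m i _ h0 h1]
  apply List.map_congr_left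
  intro k hk
  rw [contains_append_cast]
  by_cases hki : k = i.toNat
  · have hbeq : ((k : Int) == i) = true := by simp; omega
    have hcast : (k : Int) = i := by omega
    rw [if_pos hki, hbeq, hcast]
    simp only [Bool.or_true, if_true]
    exact (val_append_self buttons P i hiP).symm
  · have hbeq : ((k : Int) == i) = false := by simp; omega
    have hne : (k : Int) ≠ i := by omega
    rw [if_neg hki, hbeq, Bool.or_false]
    by_cases hkP : P.contains (k : Int)
    · rw [if_pos hkP, if_pos hkP]
      exact (val_append_mem buttons P i _ (by simpa using hkP)).symm
    · rw [if_neg hkP, if_neg hkP]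

theorem cntF_step (buttons : List (List Int)) (m : Nat) (P : List Int) (i : Int)
    (hpre : ∀ b ∈ buttons, b.Nodup) (h0 : 0 ≤ i) (h1 : i < m) (hiP : i ∉ P) :
    (pvGFilt buttons P i).foldl (fun c b => b.foldl (fun c j =>
        if decide (0 ≤ j) && decide (j < (m : Int)) && PySem.List.pyGetD (pendF m (P ++ [i])) j false
        then PySem.List.pySetD c j (PySem.List.pyGetD c j 0 - 1) else c) c) (cntF buttons m P)
      = cntF buttons m (P ++ [i]) := by
  have hpl : ∀ j : Int, 0 ≤ j → j < m →
      PySem.List.pyGetD (pendF m (P ++ [i])) j false = !((P ++ [i]).contains j) := by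
    intro j hj0 hj1
    unfold pendF
    rw [pyGetD_map_range _ m j false hj0 hj1]
    rw [show ((j.toNat : Nat) : Int) = j from Int.toNat_of_nonneg hj0]
  unfold cntF
  rw [cnt_outer m (fun k => !((P ++ [i]).contains k)) (pendF m (P ++ [i])) hpl (pvGFilt buttons P i)
    (fun b hb => hpre b (List.mem_of_mem_filter hb)) _]
  apply List.map_congr_left
  intro k hk
  rw [List.mem_range] at hk
  by_cases hP' : (P ++ [i]).contains (k : Int) = true
  · rw [hP']
    rw [show (!true) = false from rfl, if_neg (by simp)]
    rcases (by simpa using hP' : (k : Int) ∈ P ∨ (k : Int) = i) with h | h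
    · rw [val_append_mem buttons P i _ h]
    · rw [h, val_append_self buttons P i hiP, val_not_mem buttons P i hiP]
  · have hP'' : (P ++ [i]).contains (k : Int) = false := by simpa using hP'
    have hkP' : (k : Int) ∉ P ++ [i] := by simpa using hP'
    have hkP : (k : Int) ∉ P := fun h => hkP' (by simp [h])
    rw [hP'']
    rw [show (!false) = true from rfl, if_pos rfl]
    rw [val_not_mem buttons _ _ hkP', val_not_mem buttons _ _ hkP]
    rw [cnt_step buttons P i (k : Int)]

-- ===== step lemma, B =====
theorem bStep_eq (joltage : List Int) (buttons : List (List Int))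
    (hpre : ∀ b ∈ buttons, b.Nodup) (P : List Int)
    (hInv : pvInv joltage.length P) (hlt : P.length < joltage.length) :
    bStep joltage (aliveF buttons P, cntF buttons joltage.length P, pendF joltage.length P,
      resF buttons joltage.length P, P)
      = (aliveF buttons (P ++ [pvPick joltage buttons P]),
         cntF buttons joltage.length (P ++ [pvPick joltage buttons P]),
         pendF joltage.length (P ++ [pvPick joltage buttons P]),
         resF buttons joltage.length (P ++ [pvPick joltage buttons P]),
         P ++ [pvPick joltage buttons P]) := by
  have hlen := length_pvUnord joltage.length P hInv.1 hInv.2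
  have hne : pvUnord joltage.length P ≠ [] := by
    intro h; rw [h] at hlen; simp at hlen; omega
  have hiU := pick_mem joltage buttons P hne
  have hiM := (mem_pvUnord _ _ _).mp hiU
  have h0 : (0 : Int) ≤ pvPick joltage buttons P := hiM.1.1
  have h1 : pvPick joltage buttons P < (joltage.length : Int) := hiM.1.2
  have hiP : pvPick joltage buttons P ∉ P := hiM.2
  simp only [bStep]
  rw [bSel_eq joltage buttons P]
  rw [alive_filter buttons P (pvPick joltage buttons P)]
  rw [pend_step joltage.length P (pvPick joltage buttons P) h0 h1]
  rw [PySem.List.len_eq]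
  rw [cntF_step buttons joltage.length P (pvPick joltage buttons P) hpre h0 h1 hiP]
  rw [res_step buttons joltage.length P (pvPick joltage buttons P) h0 h1 hiP]
  rw [alive_step buttons P (pvPick joltage buttons P)]

-- ===== master, B =====
theorem bLoop_master (joltage : List Int) (buttons : List (List Int))
    (hpre : ∀ b ∈ buttons, b.Nodup) :
    ∀ (fuel : Nat) (P : List Int), pvInv joltage.length P → fuel + P.length = joltage.length →
    (bStep joltage)^[fuel] (aliveF buttons P, cntF buttons joltage.length P,
        pendF joltage.length P, resF buttons joltage.length P, P)
      = (aliveF buttons (pvGreedy joltage buttons fuel P),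
         cntF buttons joltage.length (pvGreedy joltage buttons fuel P),
         pendF joltage.length (pvGreedy joltage buttons fuel P),
         resF buttons joltage.length (pvGreedy joltage buttons fuel P),
         pvGreedy joltage buttons fuel P) := by
  intro fuel
  induction fuel with
  | zero => intro P _ _; rfl
  | succ f ih =>
    intro P hInv hfuel
    rw [Function.iterate_succ_apply]
    rw [bStep_eq joltage buttons hpre P hInv (by omega)]
    have hlen := length_pvUnord joltage.length P hInv.1 hInv.2
    have hne : pvUnord joltage.length P ≠ [] := by
      intro h; rw [h] at hlen; simp at hlen; omega
    have hiU := pick_mem joltage buttons P hne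
    have hiM := (mem_pvUnord _ _ _).mp hiU
    have hInv' : pvInv joltage.length (P ++ [pvPick joltage buttons P]) := by
      constructor
      · rw [List.nodup_append]
        refine ⟨hInv.1, List.nodup_singleton _, ?_⟩
        intro a ha b hb
        have hbp : b = pvPick joltage buttons P := by simpa using hb
        subst hbp
        intro hab
        exact hiM.2 (hab ▸ ha)
      · intro p hp
        rcases List.mem_append.mp hp with h | h
        · exact hInv.2 p h
        · have : p = pvPick joltage buttons P := by simpa using h
          subst this
          exact (mem_pvRangeL _ _).mpr hiM.1
    rw [ih _ hInv' (by simp; omega)]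
    rfl

-- ===== greedy invariants =====
theorem greedy_inv (joltage : List Int) (buttons : List (List Int)) :
    ∀ (fuel : Nat) (P : List Int), pvInv joltage.length P → fuel + P.length = joltage.length →
    pvInv joltage.length (pvGreedy joltage buttons fuel P) ∧
      (pvGreedy joltage buttons fuel P).length = joltage.length := by
  intro fuel
  induction fuel with
  | zero => intro P hInv hfuel; exact ⟨hInv, by simpa using hfuel⟩
  | succ f ih =>
    intro P hInv hfuel
    have hlen := length_pvUnord joltage.length P hInv.1 hInv.2
    have hne : pvUnord joltage.length P ≠ [] := by
      intro h; rw [h] at hlen; simp at hlen; omega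
    have hiU := pick_mem joltage buttons P hne
    have hiM := (mem_pvUnord _ _ _).mp hiU
    have hInv' : pvInv joltage.length (P ++ [pvPick joltage buttons P]) := by
      constructor
      · rw [List.nodup_append]
        refine ⟨hInv.1, List.nodup_singleton _, ?_⟩
        intro a ha b hb
        have hbp : b = pvPick joltage buttons P := by simpa using hb
        subst hbp
        intro hab
        exact hiM.2 (hab ▸ ha)
      · intro p hp
        rcases List.mem_append.mp hp with h | h
        · exact hInv.2 p h
        · have : p = pvPick joltage buttons P := by simpa using h
          subst this
          exact (mem_pvRangeL _ _).mpr hiM.1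
    exact ih _ hInv' (by simp; omega)

theorem greedy_full (joltage : List Int) (buttons : List (List Int))
    (G : List Int) (hInv : pvInv joltage.length G) (hlen : G.length = joltage.length) :
    ∀ k ∈ pvRangeL joltage.length, k ∈ G := by
  have hsp : G.Subperm (pvRangeL joltage.length) :=
    List.subperm_of_subset hInv.1 (fun x hx => hInv.2 x hx)
  have hperm : List.Perm G (pvRangeL joltage.length) :=
    hsp.perm_of_length_le (by simp [pvRangeL, hlen])
  intro k hk
  exact hperm.mem_iff.mpr hk

theorem foldl_const_iterate {α β : Type} (f : α → α) (l : List β) :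
    ∀ init, l.foldl (fun st _ => f st) init = f^[l.length] init := by
  induction l with
  | nil => intro init; rfl
  | cons x xs ih =>
    intro init
    rw [List.foldl_cons, ih (f init), List.length_cons, Function.iterate_succ_apply]

-- ===== final equivalence =====
theorem main_eq (joltage : List Int) (buttons : List (List Int))
    (hpre : ∀ b ∈ buttons, b.Nodup) :
    build_button_map_py joltage buttons = build_button_map_py_alt joltage buttons := by
  have hRange : PySem.List.pyRange 0 (PySem.List.len joltage) 1 = pvRangeL joltage.length := by
    rw [PySem.List.len_eq, PySem.List.pyRange_zero_natCast]
    rfl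
  have hval0 : ∀ k : Int, pvVal buttons [] k = buttons.filter (fun b => b.contains k) := by
    intro k
    unfold pvVal pvFrozen pvGFilt pvKeep
    simp
  have hInv0 : pvInv joltage.length [] := ⟨List.nodup_nil, by simp⟩
  have h_un0 : pvUnord joltage.length [] = pvRangeL joltage.length := by
    unfold pvUnord
    simp
  have hlenR : (pvRangeL joltage.length).length = joltage.length := by simp [pvRangeL]
  have h_bm0 : (pvRangeL joltage.length).foldl
      (fun d i => d.insert i (buttons.filter (fun b => b.contains i))) PySem.Dict.empty
      = mkR joltage.length (pvVal buttons []) := by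
    apply PySem.Dict.ext
    rw [PySem.Dict.items_foldl_insert_fresh (pvRangeL joltage.length) (fun i => i)
      (fun i => buttons.filter (fun b => b.contains i)) PySem.Dict.empty
      (fun a _ => by simp [PySem.Dict.contains_empty])
      (by simpa [List.map_id] using nodup_pvRangeL joltage.length)]
    show PySem.Dict.empty.items ++ _ = (pvRangeL joltage.length).map _
    rw [show (PySem.Dict.empty : PySem.Dict Int (List (List Int))).items = [] from rfl]
    rw [List.nil_append]
    exact List.map_congr_left (fun i _ => by rw [hval0 i])
  have hG := greedy_inv joltage buttons joltage.length [] hInv0 (by simp)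
  have hfull := greedy_full joltage buttons _ hG.1 hG.2
  have hGc : ∀ i ∈ pvRangeL joltage.length,
      (pvGreedy joltage buttons joltage.length []).contains i = true := by
    intro i hi
    simp only [List.contains_eq_mem, decide_eq_true_eq]
    exact hfull i hi
  -- A side
  have hA : build_button_map_py joltage buttons
      = (pvGreedy joltage buttons joltage.length [],
         (pvRangeL joltage.length).map (fun k =>
           (k, pvVal buttons (pvGreedy joltage buttons joltage.length []) k))) := by
    unfold build_button_map_py
    simp only [hRange]
    rw [PySem.Set.ofList_eq_self_of_nodup _ (nodup_pvRangeL joltage.length)]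
    rw [h_bm0, hlenR]
    have hmaster := aLoop_master joltage buttons joltage.length [] hInv0 (by simp)
    rw [h_un0] at hmaster
    rw [hmaster]
    rfl
  -- B side
  have h_cnt0 : (pvRangeL joltage.length).map (fun i => ((buttons.countP (fun b => b.contains i)) : Int))
      = cntF buttons joltage.length [] := by
    unfold pvRangeL cntF
    rw [List.map_map]
    apply List.map_congr_left
    intro k _
    simp only [Function.comp]
    rw [hval0]
    have : (buttons.filter (fun b => b.contains (k : Int))).length
        = buttons.countP (fun b => b.contains (k : Int)) := List.countP_eq_length_filter.symm
    omega
  have h_pend0 : List.replicate joltage.length true = pendF joltage.length [] := by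
    unfold pendF
    apply List.ext_getElem (by simp)
    intro k hk hk'
    simp
  have h_res0 : List.replicate joltage.length ([] : List (List Int))
      = resF buttons joltage.length [] := by
    unfold resF
    apply List.ext_getElem (by simp)
    intro k hk hk'
    simp
  have h_alive0 : buttons = aliveF buttons [] := by
    unfold aliveF pvKeep
    simp
  have hB : build_button_map_py_alt joltage buttons
      = (pvGreedy joltage buttons joltage.length [],
         (pvRangeL joltage.length).map (fun i =>
           (i, PySem.List.pyGetD (resF buttons joltage.length
             (pvGreedy joltage buttons joltage.length [])) i []))) := by
    unfold build_button_map_py_alt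
    simp only [hRange]
    rw [h_cnt0, h_pend0, h_res0]
    rw [foldl_const_iterate (bStep joltage) (pvRangeL joltage.length), hlenR]
    rw [show (buttons, cntF buttons joltage.length [], pendF joltage.length [],
          resF buttons joltage.length [], ([] : List Int))
        = (aliveF buttons [], cntF buttons joltage.length [], pendF joltage.length [],
          resF buttons joltage.length [], ([] : List Int)) from by rw [← h_alive0]]
    rw [bLoop_master joltage buttons hpre joltage.length [] hInv0 (by simp)]
  rw [hA, hB]
  apply Prod.ext
  · rfl
  · show (pvRangeL joltage.length).map _ = (pvRangeL joltage.length).map _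
    apply List.map_congr_left
    intro i hi
    have him := (mem_pvRangeL _ _).mp hi
    unfold resF
    rw [pyGetD_map_range _ _ i _ him.1 him.2]
    rw [show ((i.toNat : Nat) : Int) = i from Int.toNat_of_nonneg him.1]
    rw [if_pos (by simpa using hGc i hi)]

-- ===== VERDICT (by name: the statement is the Claim_ definition above) =====
theorem build_button_map_py_spec : Claim_equal_build_button_map_py := by
  intro joltage buttons _ hpre
  unfold Spec_build_button_map_py
  exact main_eq joltage buttons hpre
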